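-- pv_equiv track=rewrite | github.com/Jiezhi/myleetcode | src/2280-MinimumLinesToRepresentALineChart.py | minimumLines
-- ===== SOURCE A (Python) =====
-- from typing import List
--
-- def minimumLines(stockPrices: List[List[int]]) -> int:
--     """
--     79 / 79 test cases passed.
--     Status: Accepted 05/23/2022
--     Runtime: 2017 ms
--     Memory Usage: 59.4 MB
--     :param stockPrices:
--     1 <= stockPrices.length <= 10^5
--     stockPrices[i].length == 2
--     1 <= dayi, pricei <= 10^9
--     All dayi are distinct.
--     :return:
--     """
--     n = len(stockPrices)
--     if n < 2:
--         return 0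
--     stock = sorted(stockPrices, key=lambda x: x[0])
--     ret = 1
--     for i, (d, p) in enumerate(stock[2:], 1):
--         if (p - stock[i][1]) * (stock[i][0] - stock[i - 1][0]) == (stock[i][1] - stock[i - 1][1]) * (
--                 d - stock[i][0]):
--             continue
--         ret += 1
--     return ret
-- ===== SOURCE B (Python) =====
-- from typing import List
--
--
-- def minimumLines(stockPrices: List[List[int]]) -> int:
--     if len(stockPrices) < 2:
--         return 0
--     pts = sorted(stockPrices, key=lambda q: q[0])
--     edges = [(d2 - d1, p2 - p1) for (d1, p1), (d2, p2) in zip(pts, pts[1:])]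
--
--     # Divide and conquer: number of line segments covering edges[lo:hi] (hi - lo >= 1).
--     # Two halves merge into one fewer segment exactly when the two edges at the
--     # boundary have equal slope (cross product of the direction vectors vanishes).
--     def segs(lo, hi):
--         if hi - lo == 1:
--             return 1
--         mid = (lo + hi) // 2
--         left = segs(lo, mid)
--         right = segs(mid, hi)
--         (dx1, dy1), (dx2, dy2) = edges[mid - 1], edges[mid]
--         if dy1 * dx2 == dy2 * dx1:
--             return left + right - 1
--         return left + right
--
--     return segs(0, len(edges))
-- ===== Notes on version B (the rewrite author's own statement) =====
-- stated objective: alternative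
-- what changed: B first materializes the list of consecutive-edge direction vectors and then counts segments by divide and conquer over that list, merging the two halves' counts with a single boundary slope comparison, instead of A's single indexed scan testing each consecutive triple.
-- outside the precondition, e.g. on minimumLines([[1, 2, 3], [2, 4]]): A returns 1, B raises ValueError; on minimumLines([[5], [1, 2]]): A returns 1, B raises ValueError
import Mathlib
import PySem

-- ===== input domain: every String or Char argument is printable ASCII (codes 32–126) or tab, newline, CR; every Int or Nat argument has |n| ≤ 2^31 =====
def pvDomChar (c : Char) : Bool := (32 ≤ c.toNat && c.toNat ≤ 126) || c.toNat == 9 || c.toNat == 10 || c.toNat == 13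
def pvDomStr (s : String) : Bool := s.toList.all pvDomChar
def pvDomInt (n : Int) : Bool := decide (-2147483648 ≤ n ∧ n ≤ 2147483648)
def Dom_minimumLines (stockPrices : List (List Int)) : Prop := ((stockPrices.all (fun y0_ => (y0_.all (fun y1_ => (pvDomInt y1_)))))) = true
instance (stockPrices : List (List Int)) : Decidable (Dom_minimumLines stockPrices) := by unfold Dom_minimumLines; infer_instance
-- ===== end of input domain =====

-- B replaces A's indexed linear scan over consecutive triples by a two-stage computation:
-- it materializes the consecutive-edge direction vectors and counts segments by divide and
-- conquer, merging the halves' counts with one boundary slope comparison (objective: alternative).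

-- ===== PORT A =====
-- the loop body of A, lifted to a named helper (stock is the sorted list the body indexes)
def pvABody (stock : List (List Int)) (ret : Int) (idp : Int × List Int) : Int :=
  match idp.2 with
  | [d, p] =>
    let si := PySem.List.pyGetD stock idp.1 []
    let sim := PySem.List.pyGetD stock (idp.1 - 1) []
    if (p - PySem.List.pyGetD si 1 0) * (PySem.List.pyGetD si 0 0 - PySem.List.pyGetD sim 0 0)
        == (PySem.List.pyGetD si 1 0 - PySem.List.pyGetD sim 1 0) * (d - PySem.List.pyGetD si 0 0)
    then ret
    else ret + 1
  | _ => ret  -- unreachable under Pre_: Python raises unpacking a non-pair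

def minimumLines (stockPrices : List (List Int)) : Int :=
  let n : Int := stockPrices.length
  if n < 2 then 0
  else
    let stock := PySem.List.sorted stockPrices (fun x => PySem.List.pyGetD x 0 0) false
    (PySem.List.enumerate (PySem.List.slice stock (some 2) none) 1).foldl (pvABody stock) 1

-- ===== PORT B =====
-- one element of Source B's `edges` comprehension: the direction vector of the edge (d1,p1) -> (d2,p2)
def bEdge (ab : List Int × List Int) : Int × Int :=
  match ab with
  | ([d1, p1], [d2, p2]) => (d2 - d1, p2 - p1)
  | _ => (0, 0)  -- unreachable under Pre_: Python raises unpacking a non-pair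

-- Source B's recursive `segs(lo, hi)`; the second branch is a totality guard only
-- (Python never calls segs with hi - lo < 1)
def bSegs (edges : List (Int × Int)) (lo hi : Int) : Int :=
  if h1 : hi - lo = 1 then 1
  else if h2 : hi - lo < 1 then 1
  else
    let mid := PySem.Int.floordiv (lo + hi) 2
    let left := bSegs edges lo mid
    let right := bSegs edges mid hi
    let e1 := PySem.List.pyGetD edges (mid - 1) (0, 0)
    let e2 := PySem.List.pyGetD edges mid (0, 0)
    if e1.2 * e2.1 == e2.2 * e1.1 then left + right - 1 else left + right
termination_by (hi - lo).toNat
decreasing_by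
  · simp only [PySem.Int.floordiv_eq_ediv_of_pos (show (0:Int) < 2 by norm_num)]; omega
  · simp only [PySem.Int.floordiv_eq_ediv_of_pos (show (0:Int) < 2 by norm_num)]; omega

def minimumLines_alt (stockPrices : List (List Int)) : Int :=
  if stockPrices.length < 2 then 0
  else
    let pts := PySem.List.sorted stockPrices (fun q => PySem.List.pyGetD q 0 0) false
    let edges := (pts.zip pts.tail).map bEdge
    bSegs edges 0 (edges.length : Int)

-- ===== PRECONDITION & SPEC =====
-- For length ≥ 2, Pre_ excludes inputs with an inner list whose length is not exactly 2:
-- on those A raises while unpacking (and B may raise indexing), except in degenerate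
-- arrangements where the ragged list escapes A's unpacking and A's value is accidental.
def Pre_minimumLines (stockPrices : List (List Int)) : Prop :=
  stockPrices.length < 2 ∨ (∀ l ∈ stockPrices, l.length = 2)
instance (stockPrices : List (List Int)) : Decidable (Pre_minimumLines stockPrices) := by
  unfold Pre_minimumLines; infer_instance

def pvWitness_minimumLines : List (List Int) := [[3, 4], [1, 2], [2, 3], [4, 9]]

def Spec_minimumLines (stockPrices : List (List Int)) (out : Int) : Prop := out = minimumLines_alt stockPrices
instance (stockPrices : List (List Int)) (out : Int) : Decidable (Spec_minimumLines stockPrices out) := by unfold Spec_minimumLines; infer_instance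

-- ===== CLAIM (what is proved, stated in full; the proofs are below) =====
def Claim_equal_minimumLines : Prop := ∀ (stockPrices : List (List Int)), Dom_minimumLines stockPrices → Pre_minimumLines stockPrices → Spec_minimumLines stockPrices (minimumLines stockPrices)

-- ===== LEMMAS AND PROOFS =====

def pvDay (l : List Int) : Int := PySem.List.pyGetD l 0 0
def pvPrice (l : List Int) : Int := PySem.List.pyGetD l 1 0

@[simp] theorem pvDay_pair (a b : Int) : pvDay [a, b] = a := by
  simp [pvDay, PySem.List.pyGetD_zero_cons]

@[simp] theorem pvPrice_pair (a b : Int) : pvPrice [a, b] = b := by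
  show PySem.List.pyGetD [a, b] (((1 : Nat) : Int)) 0 = b
  rw [PySem.List.pyGetD_natCast]
  rfl

-- spec count shared by both proofs: number of consecutive triples that are NOT collinear
def pvTail (a0 a1 b0 b1 : Int) : List (List Int) → Int
  | [] => 0
  | c :: rest =>
    (if (pvPrice c - b1) * (b0 - a0) = (b1 - a1) * (pvDay c - b0) then 0 else 1)
      + pvTail b0 b1 (pvDay c) (pvPrice c) rest

theorem pvLen2 (l : List Int) (h : l.length = 2) : ∃ a b, l = [a, b] := by
  cases l with
  | nil => simp at h
  | cons a t =>
    cases t with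
    | nil => simp at h
    | cons b t2 =>
      cases t2 with
      | nil => exact ⟨a, b, rfl⟩
      | cons c t3 => simp at h

-- ===== the A-side loop characterisation =====

theorem pvGetD_append (pre : List (List Int)) (x : List Int) (l : List (List Int)) :
    PySem.List.pyGetD (pre ++ x :: l) ((pre.length : Int)) ([] : List Int) = x := by
  rw [PySem.List.pyGetD_natCast]
  simp [List.getD_eq_getElem?_getD]

theorem pvA_loop : ∀ (rest pre : List (List Int)) (a0 a1 b0 b1 ret : Int),
    (∀ l ∈ rest, l.length = 2) →
    List.foldl (pvABody (pre ++ [a0, a1] :: [b0, b1] :: rest)) ret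
        (PySem.List.enumerate rest ((pre.length : Int) + 1))
      = ret + pvTail a0 a1 b0 b1 rest := by
  intro rest
  induction rest with
  | nil => intro pre a0 a1 b0 b1 ret _; simp [pvTail, PySem.List.enumerate]
  | cons c rest ih =>
    intro pre a0 a1 b0 b1 ret hsh
    obtain ⟨c0, c1, rfl⟩ := pvLen2 c (hsh c (by simp))
    rw [PySem.List.enumerate_cons, List.foldl_cons]
    have hb : PySem.List.pyGetD (pre ++ [a0, a1] :: [b0, b1] :: [c0, c1] :: rest)
        ((pre.length : Int) + 1) ([] : List Int) = [b0, b1] := by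
      have h1 : ((pre.length : Int) + 1) = (((pre ++ [[a0, a1]]).length : Nat) : Int) := by
        simp
      have h2 : pre ++ [a0, a1] :: [b0, b1] :: [c0, c1] :: rest
          = (pre ++ [[a0, a1]]) ++ [b0, b1] :: [c0, c1] :: rest := by simp
      rw [h1, h2, pvGetD_append]
    have ha : PySem.List.pyGetD (pre ++ [a0, a1] :: [b0, b1] :: [c0, c1] :: rest)
        ((pre.length : Int) + 1 - 1) ([] : List Int) = [a0, a1] := by
      have h1 : ((pre.length : Int) + 1 - 1) = ((pre.length : Nat) : Int) := by ring
      rw [h1, pvGetD_append]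
    have hstep : pvABody (pre ++ [a0, a1] :: [b0, b1] :: [c0, c1] :: rest) ret
        ((pre.length : Int) + 1, [c0, c1])
        = if (c1 - b1) * (b0 - a0) = (b1 - a1) * (c0 - b0) then ret else ret + 1 := by
      simp only [pvABody, hb, ha]
      have e0 : PySem.List.pyGetD [b0, b1] 0 0 = b0 := by
        simpa using pvDay_pair b0 b1
      have e1 : PySem.List.pyGetD [b0, b1] 1 0 = b1 := by
        simpa [pvPrice] using pvPrice_pair b0 b1
      have e2 : PySem.List.pyGetD [a0, a1] 0 0 = a0 := by
        simpa using pvDay_pair a0 a1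
      have e3 : PySem.List.pyGetD [a0, a1] 1 0 = a1 := by
        simpa [pvPrice] using pvPrice_pair a0 a1
      rw [e0, e1, e2, e3]
      by_cases h : (c1 - b1) * (b0 - a0) = (b1 - a1) * (c0 - b0)
      · simp [h]
      · simp [h]
    rw [hstep]
    have h2 : pre ++ [a0, a1] :: [b0, b1] :: [c0, c1] :: rest
        = (pre ++ [[a0, a1]]) ++ [b0, b1] :: [c0, c1] :: rest := by simp
    have h3 : ((pre.length : Int) + 1) + 1 = (((pre ++ [[a0, a1]]).length : Nat) : Int) + 1 := by
      simp
    rw [h2, h3, ih (pre ++ [[a0, a1]]) b0 b1 c0 c1 _ (fun l hl => hsh l (by simp [hl]))]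
    show _ = ret + pvTail a0 a1 b0 b1 ([c0, c1] :: rest)
    rw [pvTail]
    simp only [pvDay_pair, pvPrice_pair]
    by_cases h : (c1 - b1) * (b0 - a0) = (b1 - a1) * (c0 - b0)
    · simp [h]
    · simp [h]; ring

-- ===== the B-side divide-and-conquer characterisation =====

-- 0/1 indicator of a slope break between edges i-1 and i
def pvBrk (es : List (Int × Int)) (i : Int) : Int :=
  if (PySem.List.pyGetD es (i - 1) ((0, 0) : Int × Int)).2 * (PySem.List.pyGetD es i ((0, 0) : Int × Int)).1
      = (PySem.List.pyGetD es i ((0, 0) : Int × Int)).2 * (PySem.List.pyGetD es (i - 1) ((0, 0) : Int × Int)).1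
  then 0 else 1

-- number of breaks among positions i, i+1, …, i+n-1
def pvCb (es : List (Int × Int)) : Int → Nat → Int
  | _, 0 => 0
  | i, n + 1 => pvBrk es i + pvCb es (i + 1) n

theorem pvCb_add (es : List (Int × Int)) :
    ∀ (m n : Nat) (i : Int), pvCb es i (m + n) = pvCb es i m + pvCb es (i + (m : Int)) n := by
  intro m
  induction m with
  | zero => intro n i; simp [pvCb]
  | succ k ih =>
    intro n i
    show pvCb es i (k + 1 + n) = _
    have : k + 1 + n = (k + n) + 1 := by omega
    rw [this, pvCb, pvCb, ih n (i + 1)]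
    have e : i + ((k + 1 : Nat) : Int) = i + 1 + (k : Int) := by push_cast; ring
    rw [e, ← add_assoc]

-- bSegs on a range of ≥ 1 edges = 1 + number of interior breaks
theorem pvSegs_linear : ∀ (N : Nat) (lo hi : Int) (es : List (Int × Int)),
    (hi - lo).toNat = N → 1 ≤ hi - lo →
    bSegs es lo hi = 1 + pvCb es (lo + 1) (hi - lo - 1).toNat := by
  intro N
  induction N using Nat.strong_induction_on with
  | _ N ih =>
    intro lo hi es hN h1
    rw [bSegs]
    by_cases he : hi - lo = 1
    · have : (hi - lo - 1).toNat = 0 := by omega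
      simp [he, this, pvCb]
    · have hge : ¬ (hi - lo < 1) := by omega
      simp only [he, hge, dite_false]
      have hmid : PySem.Int.floordiv (lo + hi) 2 = (lo + hi) / 2 :=
        PySem.Int.floordiv_eq_ediv_of_pos (by norm_num)
      set mid := PySem.Int.floordiv (lo + hi) 2 with hmiddef
      have hb1 : lo + 1 ≤ mid := by rw [hmid]; omega
      have hb2 : mid ≤ hi - 1 := by rw [hmid]; omega
      have hl := ih (mid - lo).toNat (by omega) lo mid es rfl (by omega)
      have hr := ih (hi - mid).toNat (by omega) mid hi es rfl (by omega)
      rw [hl, hr]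
      have hsplit : (hi - lo - 1).toNat = (mid - lo - 1).toNat + (1 + (hi - mid - 1).toNat) := by
        omega
      have hcb : pvCb es (lo + 1) (hi - lo - 1).toNat
          = pvCb es (lo + 1) (mid - lo - 1).toNat + (pvBrk es mid + pvCb es (mid + 1) (hi - mid - 1).toNat) := by
        rw [hsplit, pvCb_add]
        congr 1
        rw [show lo + 1 + ((mid - lo - 1).toNat : Int) = mid from by omega,
            show 1 + (hi - mid - 1).toNat = (hi - mid - 1).toNat + 1 from by omega,
            pvCb]
      rw [hcb]
      unfold pvBrk
      simp only [beq_iff_eq]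
      split_ifs with hc
      · ring
      · ring

theorem pvShift {α : Type} (e : α) (es : List α) (i : Int) (d : α) (h : 1 ≤ i) :
    PySem.List.pyGetD (e :: es) i d = PySem.List.pyGetD es (i - 1) d := by
  rw [PySem.List.pyGetD_of_nonneg (e :: es) d (by omega : (0 : Int) ≤ i),
      PySem.List.pyGetD_of_nonneg es d (by omega : (0 : Int) ≤ i - 1),
      show i.toNat = (i - 1).toNat + 1 from by omega, List.getD_cons_succ]

theorem pvCb_shift (e : Int × Int) (es : List (Int × Int)) :
    ∀ (n : Nat) (i : Int), 1 ≤ i → pvCb (e :: es) (i + 1) n = pvCb es i n := by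
  intro n
  induction n with
  | zero => intro i _; simp [pvCb]
  | succ k ih =>
    intro i hi
    rw [pvCb, pvCb, ih (i + 1) (by omega)]
    have hbrk : pvBrk (e :: es) (i + 1) = pvBrk es i := by
      unfold pvBrk
      rw [pvShift e es (i + 1) _ (by omega), pvShift e es (i + 1 - 1) _ (by omega)]
      simp only [show i + 1 - 1 = i from by ring]
    rw [hbrk]

-- the edge list is built structurally
theorem pvEdges_cons (a b : List Int) (t : List (List Int)) :
    ((a :: b :: t).zip (a :: b :: t).tail).map bEdge
      = bEdge (a, b) :: ((b :: t).zip (b :: t).tail).map bEdge := by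
  cases t <;> simp

theorem pvBEdge_pairs (a0 a1 b0 b1 : Int) :
    bEdge ([a0, a1], [b0, b1]) = (b0 - a0, b1 - a1) := rfl

theorem pvBrk_cons_cons (e1 e2 : Int × Int) (t : List (Int × Int)) :
    pvBrk (e1 :: e2 :: t) 1 = if e1.2 * e2.1 = e2.2 * e1.1 then 0 else 1 := by
  unfold pvBrk
  norm_num [pysem]

-- interior breaks of the edge list = non-collinear triples of the point list
theorem pvBridge : ∀ (rest : List (List Int)) (x0 x1 y0 y1 : Int),
    (∀ l ∈ rest, l.length = 2) →
    pvCb ((([x0, x1] :: [y0, y1] :: rest).zip ([x0, x1] :: [y0, y1] :: rest).tail).map bEdge) 1 rest.length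
      = pvTail x0 x1 y0 y1 rest := by
  intro rest
  induction rest with
  | nil => intro x0 x1 y0 y1 _; simp [pvCb, pvTail]
  | cons c rest ih =>
    intro x0 x1 y0 y1 hsh
    obtain ⟨c0, c1, rfl⟩ := pvLen2 c (hsh c (by simp))
    rw [pvEdges_cons]
    have hlen : ([c0, c1] :: rest).length = rest.length + 1 := by simp
    rw [hlen, pvCb]
    have hshift : pvCb (bEdge ([x0, x1], [y0, y1]) ::
          ((([y0, y1] :: [c0, c1] :: rest).zip ([y0, y1] :: [c0, c1] :: rest).tail).map bEdge))
          (1 + 1) rest.length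
        = pvTail y0 y1 c0 c1 rest := by
      rw [pvCb_shift _ _ rest.length 1 (by norm_num)]
      exact ih y0 y1 c0 c1 (fun l hl => hsh l (by simp [hl]))
    rw [hshift]
    have hb : pvBrk (bEdge ([x0, x1], [y0, y1]) ::
          ((([y0, y1] :: [c0, c1] :: rest).zip ([y0, y1] :: [c0, c1] :: rest).tail).map bEdge)) 1
        = if (y1 - x1) * (c0 - y0) = (c1 - y1) * (y0 - x0) then 0 else 1 := by
      rw [pvEdges_cons, pvBEdge_pairs, pvBEdge_pairs, pvBrk_cons_cons]
    rw [hb]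
    show _ = pvTail x0 x1 y0 y1 ([c0, c1] :: rest)
    rw [pvTail]
    simp only [pvDay_pair, pvPrice_pair]
    by_cases h : (c1 - y1) * (y0 - x0) = (y1 - x1) * (c0 - y0)
    · rw [if_pos h.symm, if_pos h]
    · rw [if_neg (fun hh => h hh.symm), if_neg h]

-- ===== assembling the verdict =====

theorem minimumLines_spec : Claim_equal_minimumLines := by
  unfold Claim_equal_minimumLines
  intro sp _ hpre
  unfold Spec_minimumLines
  by_cases hn : sp.length < 2
  · have hn' : (sp.length : Int) < 2 := by exact_mod_cast hn
    simp [minimumLines, minimumLines_alt, hn, hn']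
  · have hsh := hpre.resolve_left hn
    have hn' : ¬ ((sp.length : Int) < 2) := by exact_mod_cast hn
    have hperm := PySem.List.sorted_perm sp (fun l : List Int => PySem.List.pyGetD l 0 0) false
    have hlen : (PySem.List.sorted sp (fun l : List Int => PySem.List.pyGetD l 0 0) false).length
        = sp.length := hperm.length_eq
    have hsh' : ∀ l ∈ PySem.List.sorted sp (fun l : List Int => PySem.List.pyGetD l 0 0) false,
        l.length = 2 := fun l hl => hsh l (hperm.mem_iff.mp hl)
    obtain ⟨x, y, rest, hst⟩ : ∃ x y rest,
        PySem.List.sorted sp (fun l : List Int => PySem.List.pyGetD l 0 0) false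
          = x :: y :: rest := by
      match hm : PySem.List.sorted sp (fun l : List Int => PySem.List.pyGetD l 0 0) false with
      | [] => rw [hm] at hlen; simp at hlen; omega
      | [x] => rw [hm] at hlen; simp at hlen; omega
      | x :: y :: rest => exact ⟨x, y, rest, rfl⟩
    rw [hst] at hsh'
    obtain ⟨x0, x1, rfl⟩ := pvLen2 x (hsh' x (by simp))
    obtain ⟨y0, y1, rfl⟩ := pvLen2 y (hsh' y (by simp))
    have hshr : ∀ l ∈ rest, l.length = 2 := fun l hl => hsh' l (by simp [hl])
    -- A's value
    have hA : minimumLines sp = 1 + pvTail x0 x1 y0 y1 rest := by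
      show (if (sp.length : Int) < 2 then 0 else _) = _
      rw [if_neg hn', hst]
      have hslice : PySem.List.slice ([x0, x1] :: [y0, y1] :: rest) (some 2) none = rest := by
        rw [PySem.List.slice_some_none, show (2 : Int) = ((2 : Nat) : Int) from rfl,
            PySem.List.clampIdx_natCast]
        have hmin : min 2 ([x0, x1] :: [y0, y1] :: rest).length = 2 :=
          Nat.min_eq_left (by simp)
        rw [hmin]
        rfl
      rw [hslice]
      have := pvA_loop rest [] x0 x1 y0 y1 1 hshr
      simpa using this
    -- B's value
    have hB : minimumLines_alt sp = 1 + pvTail x0 x1 y0 y1 rest := by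
      show (if sp.length < 2 then (0:Int) else _) = _
      rw [if_neg hn, hst]
      have hlenE : ((([x0, x1] :: [y0, y1] :: rest).zip ([x0, x1] :: [y0, y1] :: rest).tail).map bEdge).length
          = rest.length + 1 := by
        simp
      show bSegs _ 0 _ = _
      rw [hlenE]
      rw [pvSegs_linear ((rest.length + 1 : Nat)) 0 ((rest.length + 1 : Nat) : Int) _ (by omega) (by omega)]
      have h0 : ((0 : Int) + 1) = 1 := by norm_num
      have h1 : (((rest.length + 1 : Nat) : Int) - 0 - 1).toNat = rest.length := by omega
      rw [h0, h1, pvBridge rest x0 x1 y0 y1 hshr]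
    rw [hA, hB]
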